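-- pv_equiv track=rewrite | github.com/zmzeng/Mask_RCNN | samples/mol/plot_scale_determine.py | pixels_of_scale_bar_determine
-- ===== SOURCE A (Python) =====
-- def pixels_of_scale_bar_determine(img):
--     left = None
--     right = None
--     for i in range(len(img)):
--         for j in range(len(img[0])):
--             if img[i][j]:
--                 if left == None:
--                     left = j
--                 elif left > j:
--                     left = j
--                 if right == None:
--                     right = j
--                 else:
--                     right = max(j, right)
--     return right - left + 1
-- ===== SOURCE B (Python) =====
-- def pixels_of_scale_bar_determine(img):
--     width = len(img[0])
--     proj = [any(row[j] for row in img) for j in range(width)]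
--     left = proj.index(True)
--     right = width - 1 - proj[::-1].index(True)
--     return right - left + 1
-- ===== Notes on version B (the rewrite author's own statement) =====
-- stated objective: faster
-- what changed: A makes one row-major pass keeping running left/right extrema with branchy None handling per pixel; B transposes the problem: it builds a boolean column projection via any() per column (C-level, short-circuiting) and finds the span with .index(True) on the projection and its reversal.
import Mathlib
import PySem

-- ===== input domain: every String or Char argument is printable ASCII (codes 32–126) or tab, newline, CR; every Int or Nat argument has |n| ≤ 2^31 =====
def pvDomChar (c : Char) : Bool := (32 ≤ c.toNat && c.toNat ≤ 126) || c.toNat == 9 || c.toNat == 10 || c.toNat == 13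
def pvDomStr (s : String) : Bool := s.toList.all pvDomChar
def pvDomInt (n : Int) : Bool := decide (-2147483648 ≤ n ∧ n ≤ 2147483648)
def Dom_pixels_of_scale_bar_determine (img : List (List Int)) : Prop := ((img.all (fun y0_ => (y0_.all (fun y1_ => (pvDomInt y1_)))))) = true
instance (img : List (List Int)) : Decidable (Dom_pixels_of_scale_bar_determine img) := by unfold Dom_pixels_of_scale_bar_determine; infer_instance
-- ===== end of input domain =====

-- B replaces A's row-major running-extrema scan with a column projection (any truthy
-- pixel per column) searched from both ends with .index(True); objective: alternative.


-- ===== PORT A =====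
-- literal port of A: nested loops over row/column indices, running left/right
-- optional extrema; the final 'right - left + 1' reads the options with getD 0
-- (Python raises TypeError there when no pixel was truthy — excluded by Pre_).
def pixels_of_scale_bar_determine (img : List (List Int)) : Int :=
  let st : Option Int × Option Int :=
    (PySem.List.pyRange 0 (img.length : Int) 1).foldl (fun st i =>
      (PySem.List.pyRange 0 ((PySem.List.pyGetD img 0 []).length : Int) 1).foldl (fun st j =>
        if PySem.List.pyGetD (PySem.List.pyGetD img i []) j 0 ≠ 0 then
          (some (match st.1 with | none => j | some l => if l > j then j else l),
           some (match st.2 with | none => j | some r => max j r))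
        else st) st)
      ((none, none) : Option Int × Option Int)
  (st.2.getD 0) - (st.1.getD 0) + 1

-- ===== PORT B =====
-- literal port of B: boolean column projection 'any(row[j] for row in img)' over
-- j in range(width), then proj.index(True) and proj[::-1].index(True) give the two
-- ends of the span (Python raises on empty img / all-falsy proj — excluded by Pre_;
-- .index failure is modelled by index? = none, read with getD 0).
def pixels_of_scale_bar_determine_alt (img : List (List Int)) : Int :=
  let width : Int := ((PySem.List.pyGetD img 0 []).length : Int)
  let proj : List Bool := (PySem.List.pyRange 0 width 1).map
    (fun j => img.any (fun row => decide (PySem.List.pyGetD row j 0 ≠ 0)))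
  let left : Int := (((PySem.List.index? proj true).getD 0 : Nat) : Int)
  let right : Int := width - 1 -
    (((PySem.List.index? ((PySem.List.slice? proj none none (-1)).getD []) true).getD 0 : Nat) : Int)
  right - left + 1

-- ===== PRECONDITION & SPEC =====
-- Pre_ excludes exactly the inputs where Python A raises: a row shorter than row 0
-- (IndexError at img[i][j]) or no truthy pixel among the scanned first len(img[0])
-- columns — including empty img — (TypeError from None arithmetic at the return).
def Pre_pixels_of_scale_bar_determine (img : List (List Int)) : Prop :=
  (∀ row ∈ img, (img.headD []).length ≤ row.length) ∧
  ∃ row ∈ img, ∃ v ∈ row.take (img.headD []).length, v ≠ 0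
instance (img : List (List Int)) : Decidable (Pre_pixels_of_scale_bar_determine img) := by unfold Pre_pixels_of_scale_bar_determine; infer_instance
def pvWitness_pixels_of_scale_bar_determine : List (List Int) := [[0, 1, 0], [1, 0, 0]]

def Spec_pixels_of_scale_bar_determine (img : List (List Int)) (out : Int) : Prop := out = pixels_of_scale_bar_determine_alt img
instance (img : List (List Int)) (out : Int) : Decidable (Spec_pixels_of_scale_bar_determine img out) := by unfold Spec_pixels_of_scale_bar_determine; infer_instance

-- ===== CLAIM (what is proved, stated in full; the proofs are below) =====
def Claim_equal_pixels_of_scale_bar_determine : Prop := ∀ (img : List (List Int)), Dom_pixels_of_scale_bar_determine img → Pre_pixels_of_scale_bar_determine img → Spec_pixels_of_scale_bar_determine img (pixels_of_scale_bar_determine img)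

-- ===== LEMMAS AND PROOFS =====

-- abbreviations for the proofs: width, column predicate, projection, truthy columns
def pvW (img : List (List Int)) : Int := ((PySem.List.pyGetD img 0 []).length : Int)
def pvP (img : List (List Int)) (j : Int) : Bool :=
  img.any (fun row => decide (PySem.List.pyGetD row j 0 ≠ 0))
def pvProj (img : List (List Int)) : List Bool :=
  (PySem.List.pyRange 0 (pvW img) 1).map (pvP img)
def pvCols (img : List (List Int)) : List Int :=
  img.flatMap (fun row =>
    (PySem.List.pyRange 0 (pvW img) 1).filter (fun j => decide (PySem.List.pyGetD row j 0 ≠ 0)))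

-- A's min/max update step, written as one function of the state and the column index
def pvStep (st : Option Int × Option Int) (j : Int) : Option Int × Option Int :=
  (some (match st.1 with | none => j | some l => if l > j then j else l),
   some (match st.2 with | none => j | some r => max j r))

-- folding A's step over a list starting from a committed (some l, some r) state
-- computes exactly the running min and max
theorem pvStep_foldl_some (cs : List Int) : ∀ l r : Int,
    cs.foldl pvStep (some l, some r) = (some (cs.foldl min l), some (cs.foldl max r)) := by
  induction cs with
  | nil => intro l r; rfl
  | cons c cs ih =>
    intro l r
    have h1 : pvStep (some l, some r) c = (some (min l c), some (max r c)) := by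
      simp only [pvStep]
      have hmin : (if l > c then c else l) = min l c := by
        split_ifs with h
        · exact (min_eq_right h.le).symm
        · exact (min_eq_left (not_lt.mp h)).symm
      rw [hmin, max_comm c r]
    rw [List.foldl_cons, h1, ih]; rfl

-- folding A's step from the fresh (none, none) state yields (min?, max?) of the list
theorem pvStep_foldl (cs : List Int) :
    cs.foldl pvStep (none, none) = (cs.min?, cs.max?) := by
  cases cs with
  | nil => rfl
  | cons c cs =>
    have h : pvStep (none, none) c = (some c, some c) := rfl
    rw [List.foldl_cons, h, pvStep_foldl_some, List.min?_cons', List.max?_cons']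

-- A's guarded update inside the column loop is a fold of pvStep over the filtered indices
theorem pv_foldl_ite (P : Int → Prop) [DecidablePred P] (l : List Int) : ∀ st,
    l.foldl (fun st j => if P j then pvStep st j else st) st
      = (l.filter (fun j => decide (P j))).foldl pvStep st := by
  induction l with
  | nil => intro st; rfl
  | cons c l ih =>
    intro st
    by_cases h : P c
    · rw [List.foldl_cons, if_pos h, List.filter_cons, if_pos (by simpa using h), List.foldl_cons, ih]
    · rw [List.foldl_cons, if_neg h, List.filter_cons, if_neg (by simpa using h), ih]

-- A computes max - min + 1 of the list of truthy column indices (row-major order)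
theorem pvA_eq (img : List (List Int)) :
    pixels_of_scale_bar_determine img
      = ((pvCols img).max?.getD 0) - ((pvCols img).min?.getD 0) + 1 := by
  unfold pixels_of_scale_bar_determine pvCols pvW
  show
    (let st : Option Int × Option Int :=
      (PySem.List.pyRange 0 (PySem.List.len img) 1).foldl (fun st i =>
        (PySem.List.pyRange 0 ((PySem.List.pyGetD img 0 []).length : Int) 1).foldl
          (fun st j => if PySem.List.pyGetD (PySem.List.pyGetD img i []) j 0 ≠ 0 then pvStep st j else st) st)
        ((none, none) : Option Int × Option Int)
     (st.2.getD 0) - (st.1.getD 0) + 1) = _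
  rw [PySem.List.foldl_pyRange_zero_pyGetD img ([] : List Int)
      (fun st row =>
        (PySem.List.pyRange 0 ((PySem.List.pyGetD img 0 []).length : Int) 1).foldl
          (fun st j => if PySem.List.pyGetD row j 0 ≠ 0 then pvStep st j else st) st)
      ((none, none) : Option Int × Option Int)]
  simp only [pv_foldl_ite, ← List.foldl_flatMap, pvStep_foldl]

-- B computes (width-1 - reversed-index) - index + 1 on the projection
theorem pvB_eq (img : List (List Int)) :
    pixels_of_scale_bar_determine_alt img
      = (pvW img - 1 - (((PySem.List.index? (pvProj img).reverse true).getD 0 : Nat) : Int))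
        - (((PySem.List.index? (pvProj img) true).getD 0 : Nat) : Int) + 1 := by
  unfold pixels_of_scale_bar_determine_alt pvProj pvP pvW
  simp only [PySem.List.slice?_none_none_neg_one, Option.getD_some]

theorem pv_pyGetD_zero (img : List (List Int)) :
    PySem.List.pyGetD img 0 [] = img.headD [] := by
  have h0 : (0 : Int) = ((0 : Nat) : Int) := rfl
  rw [h0, PySem.List.pyGetD_natCast]
  cases img <;> rfl

theorem pv_mem_cols (img : List (List Int)) (j : Int) :
    j ∈ pvCols img ↔ 0 ≤ j ∧ j < pvW img ∧ pvP img j = true := by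
  simp only [pvCols, pvP, List.mem_flatMap, List.mem_filter,
    PySem.List.mem_pyRange_one, List.any_eq_true, decide_eq_true_eq]
  tauto

theorem pv_proj_length (img : List (List Int)) :
    (pvProj img).length = (pvW img).toNat := by
  simp [pvProj, PySem.List.length_pyRange_one]

theorem pv_proj_getElem (img : List (List Int)) (i : Nat) (h : i < (pvProj img).length) :
    (pvProj img)[i] = pvP img (i : Int) := by
  simp only [pvProj] at h ⊢
  rw [List.getElem_map, PySem.List.getElem_pyRange_one, zero_add]

theorem pv_main (img : List (List Int))
    (hpre : Pre_pixels_of_scale_bar_determine img) :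
    pixels_of_scale_bar_determine img = pixels_of_scale_bar_determine_alt img := by
  obtain ⟨-, row, hrow, v, hv, hvne⟩ := hpre
  -- a truthy column index exists
  have hW : pvW img = ((img.headD []).length : Int) := by rw [pvW, pv_pyGetD_zero]
  obtain ⟨k, hk, hkv⟩ := List.getElem_of_mem hv
  have hklen : k < (img.headD []).length ∧ k < row.length := by
    have h := hk; rw [List.length_take] at h; omega
  have hrowk : row[k]'hklen.2 = v := by
    rw [← hkv]; exact (List.getElem_take).symm
  have hPk : pvP img (k : Int) = true := by
    simp only [pvP, List.any_eq_true, decide_eq_true_eq]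
    refine ⟨row, hrow, ?_⟩
    rw [PySem.List.pyGetD_natCast, List.getD_eq_getElem _ _ hklen.2, hrowk]
    exact hvne
  have hkW : (k : Int) < pvW img := by rw [hW]; exact_mod_cast hklen.1
  have htrue : true ∈ pvProj img := by
    simp only [pvProj, List.mem_map]
    exact ⟨(k : Int), PySem.List.mem_pyRange_one.mpr ⟨Int.natCast_nonneg k, hkW⟩, hPk⟩
  -- first truthy column
  obtain ⟨kL, hL⟩ := Option.isSome_iff_exists.mp
    ((PySem.List.index?_isSome_iff (pvProj img) true).mpr htrue)
  obtain ⟨hkLlt, hkLtrue, hkLmin⟩ := List.idxOf?_eq_some_iff.mp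
    ((PySem.List.index?_eq_idxOf? (pvProj img) true) ▸ hL)
  -- last truthy column, via the reversed projection
  obtain ⟨kR, hR⟩ := Option.isSome_iff_exists.mp
    ((PySem.List.index?_isSome_iff (pvProj img).reverse true).mpr
      (List.mem_reverse.mpr htrue))
  obtain ⟨hkRlt, hkRtrue, hkRmin⟩ := List.idxOf?_eq_some_iff.mp
    ((PySem.List.index?_eq_idxOf? (pvProj img).reverse true) ▸ hR)
  rw [List.length_reverse] at hkRlt
  have hlen : (pvProj img).length = (pvW img).toNat := pv_proj_length img
  have hWnn : 0 ≤ pvW img := by rw [pvW]; exact Int.natCast_nonneg _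
  -- min? of the truthy columns is kL
  have hmin : (pvCols img).min? = some (kL : Int) := by
    rw [List.min?_eq_some_iff]
    constructor
    · rw [pv_mem_cols]
      refine ⟨Int.natCast_nonneg kL, by omega, ?_⟩
      rw [← pv_proj_getElem img kL hkLlt]; exact hkLtrue
    · intro b hb
      rw [pv_mem_cols] at hb
      by_contra hlt
      push Not at hlt
      have hbnat : b = ((b.toNat : Nat) : Int) := by omega
      have h1 : b.toNat < kL := by omega
      have h2 : b.toNat < (pvProj img).length := by omega
      have := hkLmin b.toNat h1
      rw [pv_proj_getElem img b.toNat h2, ← hbnat] at this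
      exact this hb.2.2
  -- max? of the truthy columns is width - 1 - kR
  have hmax : (pvCols img).max? = some (pvW img - 1 - (kR : Int)) := by
    rw [List.max?_eq_some_iff]
    constructor
    · rw [pv_mem_cols]
      refine ⟨by omega, by omega, ?_⟩
      have hidx : (pvProj img).length - 1 - kR < (pvProj img).length := by omega
      rw [List.getElem_reverse] at hkRtrue
      have hval : pvP img ((((pvProj img).length - 1 - kR : Nat)) : Int) = true := by
        rw [← pv_proj_getElem img _ hidx]; exact hkRtrue
      have hcast : (((pvProj img).length - 1 - kR : Nat) : Int) = pvW img - 1 - (kR : Int) := by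
        omega
      rw [← hcast]; exact hval
    · intro b hb
      rw [pv_mem_cols] at hb
      by_contra hlt
      push Not at hlt
      have hbnat : b = ((b.toNat : Nat) : Int) := by omega
      have hblt : b.toNat < (pvW img).toNat := by omega
      have h1 : (pvProj img).length - 1 - b.toNat < kR := by omega
      have h2 : (pvProj img).length - 1 - b.toNat < (pvProj img).reverse.length := by
        rw [List.length_reverse]; omega
      have hcontra := hkRmin ((pvProj img).length - 1 - b.toNat) h1
      have hrev : (pvProj img).reverse[(pvProj img).length - 1 - b.toNat]'h2 = true := by
        rw [List.getElem_reverse, pv_proj_getElem img _ (by omega)]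
        have hc : (((pvProj img).length - 1 - ((pvProj img).length - 1 - b.toNat) : Nat) : Int) = b := by
          omega
        rw [hc]; exact hb.2.2
      exact hcontra hrev
  rw [pvA_eq, pvB_eq, hmin, hmax, hL, hR]
  rfl

-- ===== VERDICT (by name: the statement is the Claim_ definition above) =====
theorem pixels_of_scale_bar_determine_spec : Claim_equal_pixels_of_scale_bar_determine := by
  intro img _ hpre
  exact pv_main img hpre
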